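-- pv_equiv track=rewrite | github.com/fabiommendes/kpop | src/kpop/plots.py | group_individuals
-- ===== SOURCE A (Python) =====
-- def group_individuals(data, chunk_sizes=None):
--     """
--     Group elements in sequence data in chunks of given sizes.
--
--     Args:
--         data: list of elements
--         chunk_sizes: list of chunk sizes.
--     """
--     if chunk_sizes is None:
--         chunk_sizes = [len(data)]
--
--     if sum(chunk_sizes) != len(data):
--         raise ValueError('expect {0!s} individuals, got {1!s}'.format(sum(chunk_sizes), len(data)))
--
--     result = []
--     data = iter(data)
--     for size in chunk_sizes:
--         chunk = [x for i, x in zip(range(size), data)]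
--         result.append(chunk)
--     return result
-- ===== SOURCE B (Python) =====
-- def group_individuals(data, chunk_sizes=None):
--     """Group elements of data into chunks of the given sizes."""
--     seq = list(data)
--     if chunk_sizes is None:
--         chunk_sizes = [len(seq)]
--     if sum(chunk_sizes) != len(seq):
--         raise ValueError('expect {0!s} individuals, got {1!s}'.format(sum(chunk_sizes), len(seq)))
--     offsets = [0]
--     for size in chunk_sizes:
--         offsets.append(offsets[-1] + size)
--     return [seq[a:b] for a, b in zip(offsets, offsets[1:])]
-- ===== Notes on version B (the rewrite author's own statement) =====
-- stated objective: idiomatic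
-- what changed: B replaces A's shared-iterator consumption (each chunk built by zipping range(size) against the live iterator) with a precomputed cumulative-offset table and list slicing in a comprehension; Pre_ excludes chunk lists containing a negative size, where A's empty-chunk-without-rewind output is an accident of zip(range(size), iterator) and B's slice arithmetic is equally defensible.
-- outside the precondition, e.g. on group_individuals([1, 2], [-1, 3]): A returns [[], [1, 2]], B returns [[1], [2]]
import Mathlib
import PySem

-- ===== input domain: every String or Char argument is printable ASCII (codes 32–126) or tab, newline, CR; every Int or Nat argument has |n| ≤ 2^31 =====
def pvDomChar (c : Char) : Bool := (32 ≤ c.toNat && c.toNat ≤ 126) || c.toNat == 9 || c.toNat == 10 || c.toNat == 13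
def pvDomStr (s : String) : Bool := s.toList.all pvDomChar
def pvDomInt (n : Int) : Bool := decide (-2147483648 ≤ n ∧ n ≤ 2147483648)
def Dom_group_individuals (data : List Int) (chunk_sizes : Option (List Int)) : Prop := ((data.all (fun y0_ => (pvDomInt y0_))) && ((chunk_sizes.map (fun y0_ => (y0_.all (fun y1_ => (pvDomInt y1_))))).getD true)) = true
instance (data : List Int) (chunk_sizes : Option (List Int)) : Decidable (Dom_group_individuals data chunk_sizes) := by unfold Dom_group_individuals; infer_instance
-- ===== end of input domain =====

-- B replaces A's iterator-consuming loop by a precomputed cumulative-offset table plus slicing (idiomatic; not faster).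

-- ===== PORT A =====
-- A consumes a shared iterator: each chunk takes min(size, remaining) elements
-- (zip(range(size), it) takes nothing for size ≤ 0, i.e. size.toNat elements).
def group_individuals (data : List Int) (chunk_sizes : Option (List Int)) : List (List Int) :=
  let cs := chunk_sizes.getD [(data.length : Int)]
  -- the ValueError branch (sum cs ≠ len data) is excluded by Pre_group_individuals
  (cs.foldl (fun (st : List (List Int) × List Int) size =>
      (st.1 ++ [st.2.take size.toNat], st.2.drop size.toNat)) ([], data)).1

-- ===== PORT B =====
def group_individuals_alt (data : List Int) (chunk_sizes : Option (List Int)) : List (List Int) :=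
  let sizes := match chunk_sizes with | none => [(data.length : Int)] | some l => l
  -- the ValueError branch (sum sizes ≠ len data) is excluded by Pre_group_individuals
  let offsets := sizes.foldl (fun (os : List Int) size =>
      os ++ [os.getLast! + size]) [0]
  (offsets.zip offsets.tail).map (fun ab => PySem.List.slice data (some ab.1) (some ab.2))

-- ===== PRECONDITION & SPEC =====
-- Pre_ excludes the inputs where A raises ValueError (sum of chunk sizes ≠ length of data), and
-- chunk lists containing a negative size, where A's empty-chunk-without-rewind output is an
-- accident of zip(range(size), iterator) and B's slice arithmetic is equally defensible.
def Pre_group_individuals (data : List Int) (chunk_sizes : Option (List Int)) : Prop :=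
  (chunk_sizes.getD [(data.length : Int)]).sum = (data.length : Int) ∧
  ∀ s ∈ chunk_sizes.getD [(data.length : Int)], 0 ≤ s
instance (data : List Int) (chunk_sizes : Option (List Int)) : Decidable (Pre_group_individuals data chunk_sizes) := by unfold Pre_group_individuals; infer_instance
def pvWitness_group_individuals : List Int × Option (List Int) := ([1, 2, 3], some [1, 2])

def Spec_group_individuals (data : List Int) (chunk_sizes : Option (List Int)) (out : List (List Int)) : Prop := out = group_individuals_alt data chunk_sizes
instance (data : List Int) (chunk_sizes : Option (List Int)) (out : List (List Int)) : Decidable (Spec_group_individuals data chunk_sizes out) := by unfold Spec_group_individuals; infer_instance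

-- ===== CLAIM (what is proved, stated in full; the proofs are below) =====
def Claim_equal_group_individuals : Prop := ∀ (data : List Int) (chunk_sizes : Option (List Int)), Dom_group_individuals data chunk_sizes → Pre_group_individuals data chunk_sizes → Spec_group_individuals data chunk_sizes (group_individuals data chunk_sizes)

-- ===== LEMMAS AND PROOFS =====

/-- Reference chunking: what A's loop produces, as a structural recursion. -/
def pvChunks : List Int → List Int → List (List Int)
  | _, [] => []
  | rest, s :: cs => rest.take s.toNat :: pvChunks (rest.drop s.toNat) cs

lemma pvA_fold (cs : List Int) : ∀ (res : List (List Int)) (rest : List Int),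
    (cs.foldl (fun (st : List (List Int) × List Int) size =>
      (st.1 ++ [st.2.take size.toNat], st.2.drop size.toNat)) (res, rest)).1
      = res ++ pvChunks rest cs := by
  induction cs with
  | nil => intro res rest; simp [pvChunks]
  | cons s cs ih =>
      intro res rest
      simp only [List.foldl_cons, pvChunks, ih]
      simp

/-- Cumulative offsets from a start value. -/
def pvBounds : Int → List Int → List Int
  | acc, [] => [acc]
  | acc, s :: cs => acc :: pvBounds (acc + s) cs

lemma pvBounds_ne_nil (acc : Int) (cs : List Int) : pvBounds acc cs ≠ [] := by
  cases cs <;> simp [pvBounds]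

lemma pvB_fold (cs : List Int) : ∀ (bs : List Int) (acc : Int),
    cs.foldl (fun (os : List Int) size => os ++ [os.getLast! + size]) (bs ++ pvBounds acc [])
      = bs ++ pvBounds acc cs := by
  induction cs with
  | nil => intro bs acc; rfl
  | cons s cs ih =>
      intro bs acc
      simp only [List.foldl_cons, pvBounds]
      have hlast : (bs ++ [acc]).getLast! = acc := by simp
      rw [hlast]
      have := ih (bs ++ [acc]) (acc + s)
      simp only [pvBounds, List.append_assoc] at this ⊢
      rw [this]; simp

lemma pvB_chunks (data : List Int) (cs : List Int) (hs : ∀ s ∈ cs, 0 ≤ s) :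
    ∀ (acc : Int), 0 ≤ acc →
    ((pvBounds acc cs).zip (pvBounds acc cs).tail).map
        (fun ab => PySem.List.slice data (some ab.1) (some ab.2))
      = pvChunks (data.drop acc.toNat) cs := by
  induction cs with
  | nil => intro acc _; simp [pvBounds, pvChunks]
  | cons s cs ih =>
      intro acc hacc
      have hs0 : (0 : Int) ≤ s := hs s (by simp)
      have hacc' : (0 : Int) ≤ acc + s := by omega
      simp only [pvBounds, pvChunks, List.tail_cons]
      obtain ⟨b, bs, hb⟩ : ∃ b bs, pvBounds (acc + s) cs = b :: bs := by
        cases h : pvBounds (acc + s) cs with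
        | nil => exact absurd h (pvBounds_ne_nil _ _)
        | cons b bs => exact ⟨b, bs, rfl⟩
      have hhead : b = acc + s := by
        cases cs <;> simp [pvBounds] at hb
        all_goals try omega
      rw [hb, List.zip_cons_cons, List.map_cons, ← hb]
      have hrec := ih (fun t ht => hs t (by simp [ht])) (acc + s) hacc'
      rw [hb] at hrec; rw [hb]
      simp only [List.tail_cons] at hrec ⊢
      rw [hrec]
      have hslice : PySem.List.slice data (some acc) (some b)
          = (data.drop acc.toNat).take s.toNat := by
        rw [hhead, PySem.List.slice_toNat data hacc hacc']
        congr 1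
        have : (acc + s).toNat = acc.toNat + s.toNat := by omega
        omega
      have hdrop : (acc + s).toNat = acc.toNat + s.toNat := by omega
      rw [hslice, hdrop, ← List.drop_drop]

lemma pvMain (data : List Int) (cs : List Int) (hs : ∀ s ∈ cs, 0 ≤ s) :
    (cs.foldl (fun (st : List (List Int) × List Int) size =>
      (st.1 ++ [st.2.take size.toNat], st.2.drop size.toNat)) ([], data)).1
    = (((cs.foldl (fun (os : List Int) size => os ++ [os.getLast! + size]) [0])).zip
       ((cs.foldl (fun (os : List Int) size => os ++ [os.getLast! + size]) [0])).tail).map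
        (fun ab => PySem.List.slice data (some ab.1) (some ab.2)) := by
  have hA := pvA_fold cs [] data
  have hB := pvB_fold cs [] (0 : Int)
  simp only [List.nil_append, pvBounds] at hA hB
  rw [hA, hB]
  have h := pvB_chunks data cs hs 0 le_rfl
  simp only [Int.toNat_zero, List.drop_zero] at h
  exact h.symm

-- ===== VERDICT (by name: the statement is the Claim_ definition above) =====
theorem group_individuals_spec : Claim_equal_group_individuals := by
  intro data chunk_sizes _ hpre
  unfold Spec_group_individuals group_individuals group_individuals_alt
  cases chunk_sizes with
  | none => exact pvMain data _ hpre.2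
  | some l => exact pvMain data _ hpre.2
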